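-- pv_equiv track=rewrite | github.com/Hugodjj/TEP | Semana 4/Problema I.py | find_f_n
-- ===== SOURCE A (Python) =====
-- def find_f_n(n, cumulative_count):
--
--     lo, hi = 1, len(cumulative_count) - 1
--
--     while lo < hi:
--         mid = (lo + hi) // 2
--         if cumulative_count[mid] < n:
--             lo = mid + 1
--         else:
--             hi = mid
--
--     return lo
-- ===== SOURCE B (Python) =====
-- def find_f_n(n, cumulative_count):
--     # Recursive halving on (lo, size): size counts the candidate indices
--     # still ahead of lo; same probe sequence as the iterative (lo, hi) search,
--     # so it agrees with A on every list (sorted or not).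
--     def narrow(lo, size):
--         if size <= 0:
--             return lo
--         half = size // 2
--         if cumulative_count[lo + half] < n:
--             return narrow(lo + half + 1, size - half - 1)
--         return narrow(lo, half)
--
--     return narrow(1, len(cumulative_count) - 2)
-- ===== Notes on version B (the rewrite author's own statement) =====
-- stated objective: alternative
-- what changed: The iterative while-loop over (lo, hi) bounds is re-expressed as a recursive helper that halves a (lo, size) interval (size = remaining candidate count, mid = lo + size//2); it probes the same indices, so it matches A exactly on every list, including unsorted ones where a first-hit linear scan would differ.
import Mathlib
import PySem

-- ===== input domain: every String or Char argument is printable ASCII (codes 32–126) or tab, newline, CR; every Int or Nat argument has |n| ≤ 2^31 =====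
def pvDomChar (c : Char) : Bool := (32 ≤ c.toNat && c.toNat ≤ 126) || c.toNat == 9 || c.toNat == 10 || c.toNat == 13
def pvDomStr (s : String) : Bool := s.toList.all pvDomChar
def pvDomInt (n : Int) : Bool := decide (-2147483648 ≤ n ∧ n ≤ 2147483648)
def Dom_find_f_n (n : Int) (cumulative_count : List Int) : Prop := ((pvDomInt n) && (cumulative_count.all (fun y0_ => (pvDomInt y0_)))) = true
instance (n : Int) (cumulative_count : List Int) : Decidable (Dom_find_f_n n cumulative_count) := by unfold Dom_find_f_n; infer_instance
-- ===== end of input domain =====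

-- B re-expresses A's iterative (lo, hi) binary search as a recursive halving on
-- (lo, size) with size = number of remaining candidates; same return value on every
-- list (the probe sequence is identical), no speed claim.

-- ===== PORT A =====
-- while lo < hi: mid = (lo+hi)//2; … — ported as well-founded recursion on (hi-lo).toNat.
-- cumulative_count[mid] is ported with pyGetD default 0: whenever the loop body runs,
-- 1 ≤ lo ≤ mid < hi ≤ len-1, so the index is always in range and A never raises.
def findLoopA (n : Int) (cc : List Int) (lo hi : Int) : Int :=
  if _h : lo < hi then
    let mid := PySem.Int.floordiv (lo + hi) 2
    if PySem.List.pyGetD cc mid 0 < n then findLoopA n cc (mid + 1) hi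
    else findLoopA n cc lo mid
  else lo
termination_by (hi - lo).toNat
decreasing_by
  · have := PySem.Int.floordiv_two_mid_bounds (le_of_lt _h)
    omega
  · have := (PySem.Int.floordiv_lt_iff_lt_mul (a := lo + hi) (q := hi) (by omega : (0:Int) < 2)).mpr (by omega)
    have := PySem.Int.floordiv_two_mid_bounds (le_of_lt _h)
    omega

def find_f_n (n : Int) (cumulative_count : List Int) : Int :=
  findLoopA n cumulative_count 1 ((cumulative_count.length : Int) - 1)

-- ===== PORT B =====
def narrowB (n : Int) (cc : List Int) (lo size : Int) : Int :=
  if _h : size ≤ 0 then lo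
  else
    let half := PySem.Int.floordiv size 2
    if PySem.List.pyGetD cc (lo + half) 0 < n then
      narrowB n cc (lo + half + 1) (size - half - 1)
    else narrowB n cc lo half
termination_by size.toNat
decreasing_by
  · have := PySem.Int.floordiv_two_mid_bounds (lo := 0) (hi := size) (by omega)
    simp only [zero_add] at this
    omega
  · have h1 := PySem.Int.floordiv_two_mid_bounds (lo := 0) (hi := size) (by omega)
    have h2 := (PySem.Int.floordiv_lt_iff_lt_mul (a := size) (q := size) (by omega : (0:Int) < 2)).mpr (by omega)
    simp only [zero_add] at h1
    omega

def find_f_n_alt (n : Int) (cumulative_count : List Int) : Int :=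
  narrowB n cumulative_count 1 ((cumulative_count.length : Int) - 2)

-- ===== PRECONDITION & SPEC =====
def Spec_find_f_n (n : Int) (cumulative_count : List Int) (out : Int) : Prop := out = find_f_n_alt n cumulative_count
instance (n : Int) (cumulative_count : List Int) (out : Int) : Decidable (Spec_find_f_n n cumulative_count out) := by unfold Spec_find_f_n; infer_instance

-- ===== CLAIM (what is proved, stated in full; the proofs are below) =====
def Claim_equal_find_f_n : Prop := ∀ (n : Int) (cumulative_count : List Int), Dom_find_f_n n cumulative_count → Spec_find_f_n n cumulative_count (find_f_n n cumulative_count)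

-- ===== LEMMAS AND PROOFS =====

-- the midpoint of [lo, hi] sits half-way into the interval
lemma mid_eq_lo_add_half (lo hi : Int) :
    PySem.Int.floordiv (lo + hi) 2 = lo + PySem.Int.floordiv (hi - lo) 2 := by
  rw [PySem.Int.floordiv_eq_ediv_of_pos (by omega : (0:Int) < 2),
      PySem.Int.floordiv_eq_ediv_of_pos (by omega : (0:Int) < 2)]
  have : lo + hi = (hi - lo) + lo * 2 := by ring
  rw [this, Int.add_mul_ediv_right _ _ (by omega : (2:Int) ≠ 0)]
  ring

-- B's halving on (lo, size) computes exactly A's loop on (lo, lo + size)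
lemma narrowB_eq_findLoopA (n : Int) (cc : List Int) :
    ∀ (k : Nat) (lo hi : Int), (hi - lo).toNat ≤ k →
      narrowB n cc lo (hi - lo) = findLoopA n cc lo hi := by
  intro k
  induction k with
  | zero =>
    intro lo hi hk
    rw [narrowB, findLoopA]
    have hle : hi - lo ≤ 0 := by omega
    simp [hle, show ¬ lo < hi by omega]
  | succ k ih =>
    intro lo hi hk
    rw [narrowB, findLoopA]
    by_cases hlt : lo < hi
    · have hpos : ¬ hi - lo ≤ 0 := by omega
      simp only [hpos, hlt, dif_neg, dif_pos, not_false_iff]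
      have hmid := mid_eq_lo_add_half lo hi
      have hb := PySem.Int.floordiv_two_mid_bounds (le_of_lt hlt)
      have hstrict := (PySem.Int.floordiv_lt_iff_lt_mul (a := lo + hi) (q := hi)
        (by omega : (0:Int) < 2)).mpr (by omega)
      by_cases hc : PySem.List.pyGetD cc (lo + PySem.Int.floordiv (hi - lo) 2) 0 < n
      · rw [if_pos hc, if_pos (by rw [hmid]; exact hc)]
        have harg : hi - lo - PySem.Int.floordiv (hi - lo) 2 - 1
            = hi - (lo + PySem.Int.floordiv (hi - lo) 2 + 1) := by ring
        rw [harg]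
        have := ih (lo + PySem.Int.floordiv (hi - lo) 2 + 1) hi (by omega)
        rw [this, hmid]
      · rw [if_neg hc, if_neg (by rw [hmid]; exact hc)]
        have harg : PySem.Int.floordiv (hi - lo) 2
            = (lo + PySem.Int.floordiv (hi - lo) 2) - lo := by ring
        rw [harg]
        have := ih lo (lo + PySem.Int.floordiv (hi - lo) 2) (by omega)
        rw [this, hmid]
    · have hle : hi - lo ≤ 0 := by omega
      simp [hle, hlt]

-- ===== VERDICT (by name: the statement is the Claim_ definition above) =====
theorem find_f_n_spec : Claim_equal_find_f_n := by
  intro n cc _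
  unfold Spec_find_f_n find_f_n find_f_n_alt
  have h : (cc.length : Int) - 2 = ((cc.length : Int) - 1) - 1 := by ring
  rw [h, narrowB_eq_findLoopA n cc (((cc.length : Int) - 1) - 1).toNat 1
    ((cc.length : Int) - 1) (le_refl _)]
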